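-- pv_equiv track=rewrite | github.com/pipermerriam/ethereum-function-signature-registry | func_sig_registry/utils/import_statistics.py | retrieve_stats_from_import_results
-- ===== SOURCE A (Python) =====
-- from collections import namedtuple
--
-- ImportStats = namedtuple('ImportStats', ['num_processed', 'num_imported',
--                                          'num_duplicates', 'num_ignored'])
--
-- def retrieve_stats_from_import_results(raw_import_results):
--     num_processed = len(raw_import_results)
--
--     import_results = [
--         result
--         for result in raw_import_results
--         if result is not None
--     ]
--
--     num_ignored = num_processed - len(import_results)
--
--     if len(import_results) == 0:
--         num_imported = 0
--         num_duplicates = 0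
--     else:
--         num_imported = sum(tuple(zip(*import_results))[1])
--         num_duplicates = len(import_results) - num_imported
--
--     return ImportStats(
--         num_processed=num_processed,
--         num_imported=num_imported,
--         num_duplicates=num_duplicates,
--         num_ignored=num_ignored,
--     )
-- ===== SOURCE B (Python) =====
-- from collections import namedtuple
--
-- ImportStats = namedtuple('ImportStats', ['num_processed', 'num_imported',
--                                          'num_duplicates', 'num_ignored'])
--
-- def retrieve_stats_from_import_results(raw_import_results):
--     num_ignored = 0
--     num_imported = 0
--     for result in raw_import_results:
--         if result is None:
--             num_ignored += 1
--         else: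
--             num_imported += result[1]
--     num_processed = len(raw_import_results)
--     num_duplicates = (num_processed - num_ignored) - num_imported
--     return ImportStats(
--         num_processed=num_processed,
--         num_imported=num_imported,
--         num_duplicates=num_duplicates,
--         num_ignored=num_ignored,
--     )
-- ===== Notes on version B (the rewrite author's own statement) =====
-- stated objective: simpler
-- what changed: Replaces the filter comprehension plus zip-transpose-and-sum with a single accumulating pass that counts None entries and sums each result's second field directly, deriving duplicates arithmetically.
import Mathlib
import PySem

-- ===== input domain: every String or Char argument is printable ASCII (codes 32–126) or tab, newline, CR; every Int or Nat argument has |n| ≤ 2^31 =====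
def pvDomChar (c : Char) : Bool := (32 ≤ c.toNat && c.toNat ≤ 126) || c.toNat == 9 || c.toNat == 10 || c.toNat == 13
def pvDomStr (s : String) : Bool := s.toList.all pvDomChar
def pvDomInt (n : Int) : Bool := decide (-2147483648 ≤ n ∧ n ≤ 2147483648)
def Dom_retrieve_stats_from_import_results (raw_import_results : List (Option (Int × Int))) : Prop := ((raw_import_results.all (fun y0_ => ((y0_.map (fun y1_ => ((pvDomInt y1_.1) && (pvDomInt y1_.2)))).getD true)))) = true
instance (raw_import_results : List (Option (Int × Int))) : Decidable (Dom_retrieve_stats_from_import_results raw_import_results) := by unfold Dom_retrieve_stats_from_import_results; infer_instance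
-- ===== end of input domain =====

-- ===== PORT A =====
-- One honest line: B replaces the filter + zip-transpose + sum with one accumulating pass; same results, same O(n) cost.
def retrieve_stats_from_import_results (raw_import_results : List (Option (Int × Int))) : Int × Int × Int × Int :=
  let num_processed : Int := raw_import_results.length
  let import_results : List (Int × Int) := raw_import_results.filterMap id
  let num_ignored : Int := num_processed - import_results.length
  if import_results.length = 0 then
    (num_processed, 0, 0, num_ignored)
  else
    -- sum(tuple(zip(*import_results))[1]): the transposed second column, summed
    let num_imported : Int := (import_results.map Prod.snd).foldl (· + ·) 0
    let num_duplicates : Int := (import_results.length : Int) - num_imported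
    (num_processed, num_imported, num_duplicates, num_ignored)

-- ===== PORT B =====
def retrieve_stats_from_import_results_alt (raw_import_results : List (Option (Int × Int))) : Int × Int × Int × Int :=
  let acc := raw_import_results.foldl
    (fun (acc : Int × Int) result =>
      match result with
      | none => (acc.1 + 1, acc.2)
      | some p => (acc.1, acc.2 + p.2)) (0, 0)
  let num_processed : Int := raw_import_results.length
  let num_duplicates : Int := (num_processed - acc.1) - acc.2
  (num_processed, acc.2, num_duplicates, acc.1)

-- ===== PRECONDITION & SPEC =====
def Spec_retrieve_stats_from_import_results (raw_import_results : List (Option (Int × Int))) (out : Int × Int × Int × Int) : Prop := out = retrieve_stats_from_import_results_alt raw_import_results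
instance (raw_import_results : List (Option (Int × Int))) (out : Int × Int × Int × Int) : Decidable (Spec_retrieve_stats_from_import_results raw_import_results out) := by unfold Spec_retrieve_stats_from_import_results; infer_instance

-- ===== CLAIM (what is proved, stated in full; the proofs are below) =====
def Claim_equal_retrieve_stats_from_import_results : Prop := ∀ (raw_import_results : List (Option (Int × Int))), Dom_retrieve_stats_from_import_results raw_import_results → Spec_retrieve_stats_from_import_results raw_import_results (retrieve_stats_from_import_results raw_import_results)

-- ===== LEMMAS AND PROOFS =====

-- ===== VERDICT (by name: the statement is the Claim_ definition above) =====
theorem foldl_add_shift (l : List Int) (c : Int) :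
    l.foldl (· + ·) c = c + l.foldl (· + ·) 0 := by
  induction l generalizing c with
  | nil => simp
  | cons x xs ih => simp [List.foldl, ih (c := c + x), ih (c := x)]; ring

theorem alt_fold (xs : List (Option (Int × Int))) (a b : Int) :
    xs.foldl (fun (acc : Int × Int) result =>
      match result with
      | none => (acc.1 + 1, acc.2)
      | some p => (acc.1, acc.2 + p.2)) (a, b)
    = (a + ((xs.length : Int) - (xs.filterMap id).length),
       b + ((xs.filterMap id).map Prod.snd).foldl (· + ·) 0) := by
  induction xs generalizing a b with
  | nil => simp
  | cons x xs ih =>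
    cases x with
    | none => simp [List.foldl, ih]; ring
    | some p =>
      rw [List.foldl_cons, ih]
      simp only [List.filterMap_cons, id, List.length_cons, List.map_cons,
        List.foldl_cons, Prod.mk.injEq]
      refine ⟨by push_cast; ring, ?_⟩
      rw [foldl_add_shift _ (0 + p.2)]
      ring

theorem retrieve_stats_from_import_results_spec : Claim_equal_retrieve_stats_from_import_results := by
  intro xs _
  unfold Spec_retrieve_stats_from_import_results retrieve_stats_from_import_results retrieve_stats_from_import_results_alt
  rw [alt_fold]
  dsimp only
  split_ifs with h
  · rw [List.eq_nil_iff_length_eq_zero.mpr h]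
    simp only [Prod.mk.injEq, List.map_nil, List.foldl_nil, List.length_nil, Nat.cast_zero]
    exact ⟨trivial, by omega, by omega, by omega⟩
  · simp only [Prod.mk.injEq]
    exact ⟨trivial, by omega, by omega, by omega⟩
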